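-- pv_equiv track=rewrite | github.com/5-algorithms/TB2715 | week8/p_신고결과받기.py | solution
-- ===== SOURCE A (Python) =====
-- def solution(id_list, report, k):
--     answer = []
--
--     reported_dict = {}
--     reporter_dict = {}
--     for a_id in id_list:
--         reported_dict[a_id] = set()
--         reporter_dict[a_id] = set()
--
--     blocked_member = set()
--
--     for a_r in report:
--         reporter, reported = a_r.split(' ')
--         reported_dict[reported].add(reporter)
--         reporter_dict[reporter].add(reported)
--
--         if len(reported_dict[reported]) >= k:
--             blocked_member.add(reported)
--
--     for k in id_list:
--         answer.append(len(blocked_member & reporter_dict[k]))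
--
--     return answer
-- ===== SOURCE B (Python) =====
-- def solution(id_list, report, k):
--     # One count-then-tally pass over deduplicated (reporter, reported) pairs
--     # instead of per-user set intersections.
--     pairs = {tuple(r.split(' ')) for r in report}
--     counts = {}
--     for _, reported in pairs:
--         counts[reported] = counts.get(reported, 0) + 1
--     blocked = {u for u, c in counts.items() if c >= k}
--     tally = {}
--     for reporter, reported in pairs:
--         if reported in blocked:
--             tally[reporter] = tally.get(reporter, 0) + 1
--     return [tally.get(u, 0) for u in id_list]
-- ===== Notes on version B (the rewrite author's own statement) =====
-- stated objective: alternative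
-- what changed: B replaces A's per-id reporter/reported set dictionaries and per-user set intersection with one dedup of the (reporter, reported) pairs followed by a count pass (distinct reporters per reported id), a blocked set, and a tally pass per reporter; Pre_ excludes inputs where A raises (a report not splitting into exactly two fields, or a field not in id_list).
import Mathlib
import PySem

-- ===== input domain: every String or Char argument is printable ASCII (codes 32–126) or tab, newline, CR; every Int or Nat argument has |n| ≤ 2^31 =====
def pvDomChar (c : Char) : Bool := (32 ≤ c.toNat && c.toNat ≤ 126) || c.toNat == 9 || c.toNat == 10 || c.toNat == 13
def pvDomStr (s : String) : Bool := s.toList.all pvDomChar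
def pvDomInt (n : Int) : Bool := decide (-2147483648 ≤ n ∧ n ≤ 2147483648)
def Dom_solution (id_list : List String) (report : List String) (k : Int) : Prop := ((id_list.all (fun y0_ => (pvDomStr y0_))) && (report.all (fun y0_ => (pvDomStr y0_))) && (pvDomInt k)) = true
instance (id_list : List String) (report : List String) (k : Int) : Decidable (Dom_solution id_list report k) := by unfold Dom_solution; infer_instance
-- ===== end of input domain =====

-- B replaces A's per-id reporter/reported set dicts + per-user set intersection by one dedup of the
-- (reporter, reported) pairs, a count pass, a blocked set and a tally pass (objective: alternative).

-- shared parsing helper: r.split(' ')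
def pvSplit (r : String) : List String := (PySem.Str.split? r " ").getD []

-- ===== PORT A =====
-- initialization loop: reported_dict[a_id] = set(); reporter_dict[a_id] = set()
def pvInitA (id_list : List String) :
    PySem.Dict String (PySem.Set String) × PySem.Dict String (PySem.Set String) :=
  id_list.foldl
    (fun d a_id => (d.1.insert a_id PySem.Set.empty, d.2.insert a_id PySem.Set.empty))
    (PySem.Dict.empty, PySem.Dict.empty)

-- report-loop body; on a report that does not split into exactly two fields, or whose fields are
-- missing keys, Python A raises (ValueError/KeyError) — such inputs are outside Pre_solution and the
-- port is total-ized by skipping / getD.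
def pvStepA (k : Int)
    (st : PySem.Dict String (PySem.Set String) × PySem.Dict String (PySem.Set String) × PySem.Set String)
    (a_r : String) :
    PySem.Dict String (PySem.Set String) × PySem.Dict String (PySem.Set String) × PySem.Set String :=
  match pvSplit a_r with
  | [reporter, reported] =>
    let rd := PySem.Set.add (st.1.getD reported PySem.Set.empty) reporter
    let rp := PySem.Set.add (st.2.1.getD reporter PySem.Set.empty) reported
    let bl := if k ≤ PySem.Set.len rd then PySem.Set.add st.2.2 reported else st.2.2
    (st.1.insert reported rd, st.2.1.insert reporter rp, bl)
  | _ => st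

def solution (id_list : List String) (report : List String) (k : Int) : List Int :=
  let init := pvInitA id_list
  let st := report.foldl (pvStepA k) (init.1, init.2, PySem.Set.empty)
  id_list.map (fun u =>
    PySem.Set.len (PySem.Set.inter st.2.2 (st.2.1.getD u PySem.Set.empty)))

-- ===== PORT B =====
-- tuple(r.split(' ')); a tuple of length ≠ 2 makes Python B raise on unpacking (outside Pre_solution)
def pvPair (r : String) : String × String :=
  match pvSplit r with
  | [p, q] => (p, q)
  | _ => ("", "")

def solution_alt (id_list : List String) (report : List String) (k : Int) : List Int :=
  let pairs : PySem.Set (String × String) := PySem.Set.ofList (report.map pvPair)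
  let counts : PySem.Dict String Int :=
    pairs.foldl (fun d x => d.modify x.2 0 (· + 1)) PySem.Dict.empty
  let blocked : PySem.Set String :=
    PySem.Set.ofList ((counts.items.filter (fun uc => decide (k ≤ uc.2))).map (·.1))
  let tally : PySem.Dict String Int :=
    pairs.foldl
      (fun d x => if PySem.Set.contains blocked x.2 then d.modify x.1 0 (· + 1) else d)
      PySem.Dict.empty
  id_list.map (fun u => tally.getD u 0)

-- ===== PRECONDITION & SPEC =====
-- Pre_ excludes exactly the inputs on which Python A raises: a report that does not split on ' '
-- into exactly two fields (ValueError), or a field that is not a key of the dicts built over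
-- id_list (KeyError).
def Pre_solution (id_list : List String) (report : List String) (k : Int) : Prop :=
  ∀ r ∈ report, (pvSplit r).length = 2 ∧ ∀ x ∈ pvSplit r, x ∈ id_list
instance (id_list : List String) (report : List String) (k : Int) :
    Decidable (Pre_solution id_list report k) := by unfold Pre_solution; infer_instance

def pvWitness_solution : List String × List String × Int := (["a", "b"], (["a b", "b a"], 1))

def Spec_solution (id_list : List String) (report : List String) (k : Int) (out : List Int) : Prop :=
  out = solution_alt id_list report k
instance (id_list : List String) (report : List String) (k : Int) (out : List Int) :
    Decidable (Spec_solution id_list report k out) := by unfold Spec_solution; infer_instance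

-- ===== CLAIM (what is proved, stated in full; the proofs are below) =====
def Claim_equal_solution : Prop := ∀ (id_list : List String) (report : List String) (k : Int), Dom_solution id_list report k → Pre_solution id_list report k → Spec_solution id_list report k (solution id_list report k)


-- ===== LEMMAS AND PROOFS =====

-- the parsed pair list and the reporter/reported projections the proof reasons about
def pvRepIn (u : String) (l : List (String × String)) : List String :=
  (l.filter (fun x => x.2 == u)).map (·.1)
def pvRepBy (u : String) (l : List (String × String)) : List String :=
  (l.filter (fun x => x.1 == u)).map (·.2)

lemma pv_len_eq_of_nodup {α : Type} (l1 l2 : List α) (h1 : l1.Nodup) (h2 : l2.Nodup)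
    (h : ∀ x, x ∈ l1 ↔ x ∈ l2) : l1.length = l2.length :=
  List.Perm.length_eq ((List.perm_ext_iff_of_nodup h1 h2).2 h)

lemma pv_ofList_append_singleton {α : Type} [BEq α] (xs : List α) (x : α) :
    PySem.Set.ofList (xs ++ [x]) = PySem.Set.add (PySem.Set.ofList xs) x := by
  simp [PySem.Set.ofList_eq_foldl, List.foldl_append]

lemma pv_len_le_add {α : Type} [BEq α] (s : PySem.Set α) (x : α) :
    PySem.Set.len s ≤ PySem.Set.len (PySem.Set.add s x) := by
  unfold PySem.Set.add PySem.Set.len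
  split <;> simp

lemma pv_initA_getD (id_list : List String) (u : String) :
    ((pvInitA id_list).1.getD u PySem.Set.empty = PySem.Set.empty) ∧
    ((pvInitA id_list).2.getD u PySem.Set.empty = PySem.Set.empty) := by
  unfold pvInitA
  generalize h : ((PySem.Dict.empty, PySem.Dict.empty) :
      PySem.Dict String (PySem.Set String) × PySem.Dict String (PySem.Set String)) = d
  have hd : (∀ v, d.1.getD v PySem.Set.empty = PySem.Set.empty) ∧
      (∀ v, d.2.getD v PySem.Set.empty = PySem.Set.empty) := by
    subst h; exact ⟨fun v => PySem.Dict.getD_empty .., fun v => PySem.Dict.getD_empty ..⟩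
  clear h
  induction id_list generalizing d with
  | nil => exact ⟨hd.1 u, hd.2 u⟩
  | cons a t ih =>
    simp only [List.foldl_cons]
    exact ih _ ⟨fun v => by
        simp only [PySem.Dict.getD_insert]; split <;> [rfl; exact hd.1 v],
      fun v => by
        simp only [PySem.Dict.getD_insert]; split <;> [rfl; exact hd.2 v]⟩

-- the invariant of A's report loop
lemma pv_repIn_append_self (u a : String) (ps : List (String × String)) :
    pvRepIn u (ps ++ [(a, u)]) = pvRepIn u ps ++ [a] := by
  simp [pvRepIn, List.filter_append]
lemma pv_repIn_append_ne (u a b : String) (ps : List (String × String)) (h : u ≠ b) :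
    pvRepIn u (ps ++ [(a, b)]) = pvRepIn u ps := by
  simp [pvRepIn, List.filter_append, h.symm]
lemma pv_repBy_append_self (u b : String) (ps : List (String × String)) :
    pvRepBy u (ps ++ [(u, b)]) = pvRepBy u ps ++ [b] := by
  simp [pvRepBy, List.filter_append]
lemma pv_repBy_append_ne (u a b : String) (ps : List (String × String)) (h : u ≠ a) :
    pvRepBy u (ps ++ [(a, b)]) = pvRepBy u ps := by
  simp [pvRepBy, List.filter_append, h.symm]

lemma pv_foldA (k : Int) (id_list : List String) (l : List String)
    (h2 : ∀ r ∈ l, (pvSplit r).length = 2) :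
    (∀ u, (l.foldl (pvStepA k) ((pvInitA id_list).1, (pvInitA id_list).2, PySem.Set.empty)).1.getD
        u PySem.Set.empty = PySem.Set.ofList (pvRepIn u (l.map pvPair))) ∧
    (∀ u, (l.foldl (pvStepA k) ((pvInitA id_list).1, (pvInitA id_list).2, PySem.Set.empty)).2.1.getD
        u PySem.Set.empty = PySem.Set.ofList (pvRepBy u (l.map pvPair))) ∧
    ((l.foldl (pvStepA k) ((pvInitA id_list).1, (pvInitA id_list).2, PySem.Set.empty)).2.2 :
        List String).Nodup ∧
    (∀ u, u ∈ (l.foldl (pvStepA k) ((pvInitA id_list).1, (pvInitA id_list).2, PySem.Set.empty)).2.2 ↔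
      (∃ p, (p, u) ∈ l.map pvPair) ∧
      k ≤ PySem.Set.len (PySem.Set.ofList (pvRepIn u (l.map pvPair)))) := by
  induction l using List.reverseRecOn with
  | nil =>
    refine ⟨fun u => ?_, fun u => ?_, ?_, fun u => ?_⟩
    · simpa [pvRepIn] using (pv_initA_getD id_list u).1
    · simpa [pvRepBy] using (pv_initA_getD id_list u).2
    · simp [PySem.Set.empty]
    · simp [PySem.Set.empty, pvRepIn]
  | append_singleton t r ih =>
    have ht2 : ∀ x ∈ t, (pvSplit x).length = 2 := fun x hx => h2 x (by simp [hx])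
    have hr : (pvSplit r).length = 2 := h2 r (by simp)
    obtain ⟨a, b, hsp⟩ : ∃ a b, pvSplit r = [a, b] := by
      match hval : pvSplit r with
      | [a, b] => exact ⟨a, b, rfl⟩
      | [] | [_] | _ :: _ :: _ :: _ => (rw [hval] at hr; simp at hr)
    have hpair : pvPair r = (a, b) := by simp [pvPair, hsp]
    obtain ⟨IH1, IH2, IH3, IH4⟩ := ih ht2
    rw [List.foldl_append, List.foldl_cons, List.foldl_nil]
    generalize hst : t.foldl (pvStepA k)
        ((pvInitA id_list).1, (pvInitA id_list).2, PySem.Set.empty) = st at *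
    rw [show pvStepA k st r =
        (st.1.insert b (PySem.Set.add (st.1.getD b PySem.Set.empty) a),
         st.2.1.insert a (PySem.Set.add (st.2.1.getD a PySem.Set.empty) b),
         if k ≤ PySem.Set.len (PySem.Set.add (st.1.getD b PySem.Set.empty) a)
           then PySem.Set.add st.2.2 b else st.2.2) from by rw [pvStepA, hsp]]
    rw [List.map_append, List.map_cons, List.map_nil, hpair]
    have hRb : PySem.Set.add (st.1.getD b PySem.Set.empty) a =
        PySem.Set.ofList (pvRepIn b (t.map pvPair ++ [(a, b)])) := by
      rw [IH1 b, pv_repIn_append_self, pv_ofList_append_singleton]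
    refine ⟨fun u => ?_, fun u => ?_, ?_, fun u => ?_⟩
    · rw [PySem.Dict.getD_insert]
      by_cases h : u = b
      · subst h; rw [if_pos rfl, hRb]
      · rw [if_neg h, pv_repIn_append_ne u a b _ h, IH1 u]
    · rw [PySem.Dict.getD_insert]
      by_cases h : u = a
      · rw [if_pos h, h, pv_repBy_append_self, pv_ofList_append_singleton, IH2 a]
      · rw [if_neg h, pv_repBy_append_ne u a b _ h, IH2 u]
    · split
      · exact PySem.Set.nodup_add _ _ IH3
      · exact IH3
    · rw [hRb]
      have hmem : (∃ p, (p, u) ∈ t.map pvPair ++ [(a, b)]) ↔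
          (∃ p, (p, u) ∈ t.map pvPair) ∨ u = b := by
        constructor
        · rintro ⟨p, hp⟩
          rcases List.mem_append.1 hp with h' | h'
          · exact Or.inl ⟨p, h'⟩
          · simp at h'; exact Or.inr h'.2
        · rintro (⟨p, hp⟩ | rfl)
          · exact ⟨p, List.mem_append.2 (Or.inl hp)⟩
          · exact ⟨a, List.mem_append.2 (Or.inr (by simp))⟩
      by_cases h : u = b
      · subst h
        rw [pv_repIn_append_self] at *
        constructor
        · intro hin
          refine ⟨hmem.2 (Or.inr rfl), ?_⟩
          split at hin
          · next hc =>
            rcases (PySem.Set.mem_add _ _ _).1 hin with h' | h'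
            · calc k ≤ PySem.Set.len (PySem.Set.ofList (pvRepIn u (t.map pvPair))) :=
                    ((IH4 u).1 h').2
                _ ≤ _ := by
                    rw [pv_ofList_append_singleton]; exact pv_len_le_add _ _
            · exact hc
          · next hc =>
            calc k ≤ PySem.Set.len (PySem.Set.ofList (pvRepIn u (t.map pvPair))) :=
                  ((IH4 u).1 hin).2
              _ ≤ _ := by
                  rw [pv_ofList_append_singleton]; exact pv_len_le_add _ _
        · rintro ⟨-, hk⟩
          rw [if_pos hk]
          exact (PySem.Set.mem_add _ _ _).2 (Or.inr rfl)
      · rw [pv_repIn_append_ne u a b _ h]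
        have hstep : u ∈ (if k ≤ PySem.Set.len
              (PySem.Set.ofList (pvRepIn b (t.map pvPair ++ [(a, b)])))
            then PySem.Set.add st.2.2 b else st.2.2) ↔ u ∈ st.2.2 := by
          split
          · rw [PySem.Set.mem_add]
            exact ⟨fun h' => h'.resolve_right h, Or.inl⟩
          · exact Iff.rfl
        rw [hstep, IH4 u, hmem, or_iff_left h]

lemma pv_set_len (s : PySem.Set String) : PySem.Set.len s = ((s : List String).length : Int) := by
  unfold PySem.Set.len; rfl

lemma pv_mem_repIn (p v : String) (ps : List (String × String)) :
    p ∈ pvRepIn v ps ↔ (p, v) ∈ ps := by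
  simp only [pvRepIn, List.mem_map, List.mem_filter, beq_iff_eq]
  constructor
  · rintro ⟨x, ⟨hx, h2⟩, h1⟩
    have : x = (p, v) := Prod.ext h1 h2
    rwa [this] at hx
  · intro h; exact ⟨(p, v), ⟨h, rfl⟩, rfl⟩

lemma pv_mem_repBy (v u : String) (ps : List (String × String)) :
    v ∈ pvRepBy u ps ↔ (u, v) ∈ ps := by
  simp only [pvRepBy, List.mem_map, List.mem_filter, beq_iff_eq]
  constructor
  · rintro ⟨x, ⟨hx, h1⟩, h2⟩
    have : x = (u, v) := Prod.ext h1 h2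
    rwa [this] at hx
  · intro h; exact ⟨(u, v), ⟨h, rfl⟩, rfl⟩

-- the count of a reported id over the deduplicated pairs is the number of its distinct reporters
lemma pv_count_snd (ps : List (String × String)) (v : String) :
    ((((PySem.Set.ofList ps : List (String × String)).map (fun x => x.2)).count v : Nat) : Int) =
    PySem.Set.len (PySem.Set.ofList (pvRepIn v ps)) := by
  rw [pv_set_len]
  congr 1
  have h1 : ((PySem.Set.ofList ps : List (String × String)).map (fun x => x.2)).count v =
      (((PySem.Set.ofList ps : List (String × String)).filter
        (fun x => x.2 == v)).map (fun x => x.1)).length := by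
    rw [List.length_map, List.count, List.countP_map, List.countP_eq_length_filter]
    rfl
  rw [h1]
  apply pv_len_eq_of_nodup
  · apply List.Nodup.map_on
    · intro x hx y hy hxy
      simp only [List.mem_filter, beq_iff_eq] at hx hy
      exact Prod.ext hxy (hx.2.trans hy.2.symm)
    · exact (PySem.Set.nodup_ofList ps).filter _
  · exact PySem.Set.nodup_ofList _
  · intro p
    rw [PySem.Set.mem_ofList, pv_mem_repIn]
    simp only [List.mem_map, List.mem_filter, beq_iff_eq]
    constructor
    · rintro ⟨x, ⟨hx, h2⟩, h1⟩
      have : x = (p, v) := Prod.ext h1 h2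
      rw [this] at hx
      exact (PySem.Set.mem_ofList _ _).1 hx
    · intro h; exact ⟨(p, v), ⟨(PySem.Set.mem_ofList _ _).2 h, rfl⟩, rfl⟩

-- ===== VERDICT (by name: the statement is the Claim_ definition above) =====
theorem solution_spec : Claim_equal_solution := by
  intro id_list report k _ hpre
  unfold Spec_solution solution solution_alt
  simp only []
  obtain ⟨I1, I2, I3, I4⟩ := pv_foldA k id_list report (fun r hr => (hpre r hr).1)
  apply List.map_congr_left
  intro u _
  -- abbreviations
  set ps := report.map pvPair with hps
  set P : PySem.Set (String × String) := PySem.Set.ofList ps with hP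
  set st := report.foldl (pvStepA k) ((pvInitA id_list).1, (pvInitA id_list).2, PySem.Set.empty)
    with hst
  set counts : PySem.Dict String Int :=
    P.foldl (fun d x => d.modify x.2 0 (· + 1)) PySem.Dict.empty with hcounts
  set blocked : PySem.Set String :=
    PySem.Set.ofList ((counts.items.filter (fun uc => decide (k ≤ uc.2))).map (·.1)) with hblocked
  -- counts is the counter of the reported ids of the deduplicated pairs
  have hcnt : counts = PySem.Dict.counter ((P : List (String × String)).map (fun x => x.2)) := by
    rw [hcounts, PySem.Dict.counter_eq_foldl, List.foldl_map]
  -- membership in B's blocked set agrees with A's blocked_member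
  have hblk : ∀ v, v ∈ blocked ↔ v ∈ st.2.2 := by
    intro v
    rw [hblocked, PySem.Set.mem_ofList, hcnt, I4 v, PySem.Dict.items_counter, List.filter_map,
      List.map_map]
    simp only [Function.comp_def, List.map_id_fun', id_eq, List.mem_filter,
      PySem.Set.mem_ofList, decide_eq_true_eq]
    constructor
    · rintro ⟨h1, h2⟩
      obtain ⟨x, hx, rfl⟩ := List.mem_map.1 h1
      refine ⟨⟨x.1, ?_⟩, ?_⟩
      · exact (PySem.Set.mem_ofList _ _).1 hx
      · rw [← pv_count_snd]; exact_mod_cast h2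
    · rintro ⟨⟨p, hp⟩, h2⟩
      have hmem : (p, v) ∈ (P : List (String × String)) := (PySem.Set.mem_ofList _ _).2 hp
      refine ⟨List.mem_map.2 ⟨(p, v), hmem, rfl⟩, ?_⟩
      rw [pv_count_snd]; exact h2
  -- B's tally is a counter over the blocked deduplicated pairs, keyed by reporter
  have htally : (P.foldl
        (fun d x => if PySem.Set.contains blocked x.2 then d.modify x.1 0 (· + 1) else d)
        PySem.Dict.empty).getD u 0 =
      ((((P : List (String × String)).filter (fun x => PySem.Set.contains blocked x.2)).map
        (fun x => x.1)).count u : Int) := by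
    rw [← List.foldl_filter,
      ← List.foldl_map (f := fun x : String × String => x.1)
        (g := fun (d : PySem.Dict String Int) y => d.modify y 0 (· + 1)),
      ← PySem.Dict.counter_eq_foldl, PySem.Dict.getD_counter]
  rw [htally, I2 u]
  -- both sides count the distinct blocked ids that u reported
  have hq : ∀ x : String × String, PySem.Set.contains blocked x.2 = true ↔ x.2 ∈ st.2.2 :=
    fun x => (PySem.Set.contains_iff _ _).trans (hblk x.2)
  have hcard : (((P : List (String × String)).filter
        (fun x => PySem.Set.contains blocked x.2)).map (fun x => x.1)).count u =
      (PySem.Set.inter st.2.2 (PySem.Set.ofList (pvRepBy u ps)) : List String).length := by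
    have h1 : (((P : List (String × String)).filter
          (fun x => PySem.Set.contains blocked x.2)).map (fun x => x.1)).count u =
        (((P : List (String × String)).filter
          (fun x => x.1 == u && PySem.Set.contains blocked x.2)).map (fun x => x.2)).length := by
      rw [List.length_map, List.count, List.countP_map, List.countP_eq_length_filter,
        List.filter_filter]
      simp
    rw [h1]
    apply pv_len_eq_of_nodup
    · apply List.Nodup.map_on
      · intro x hx y hy hxy
        simp only [List.mem_filter, Bool.and_eq_true, beq_iff_eq] at hx hy
        exact Prod.ext (hx.2.1.trans hy.2.1.symm) hxy
      · exact (PySem.Set.nodup_ofList ps).filter _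
    · exact PySem.Set.nodup_inter _ _ I3
    · intro v
      rw [PySem.Set.mem_inter, PySem.Set.mem_ofList, pv_mem_repBy]
      simp only [List.mem_map, List.mem_filter, Bool.and_eq_true, beq_iff_eq]
      constructor
      · rintro ⟨x, ⟨hx, h1, hbv⟩, h2⟩
        have hx' : x = (u, v) := Prod.ext h1 h2
        subst hx'
        exact ⟨(hq _).1 hbv, (PySem.Set.mem_ofList _ _).1 hx⟩
      · rintro ⟨hbv, hmem⟩
        exact ⟨(u, v), ⟨(PySem.Set.mem_ofList _ _).2 hmem, rfl, (hq (u, v)).2 hbv⟩, rfl⟩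
  rw [pv_set_len, hcard]
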